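-- pv_equiv track=rewrite | github.com/guilhermegouw/Learn-to-code-by-solving-problems | chapter_4/americanadian/ameri_canadian.py | american_to_canadian
-- ===== SOURCE A (Python) =====
-- def american_to_canadian(sentence: str) -> str:
--     # import ipdb; ipdb.sset_trace()
--     vowels = ['a', 'e', 'i', 'o', 'u', 'y']
--     words = sentence.split()
--     canadian_words = []
--     for word in words:
--         if len(word) > 3 and word[-3] not in vowels and word[-2:] == 'or':
--             word = word[:-2] + 'our'
--         canadian_words.append(word)
--     return ' '.join(canadian_words)
-- ===== SOURCE B (Python) =====
-- def american_to_canadian(sentence: str) -> str: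
--     # Single pass over the characters: words are flushed into the output as
--     # they end, so no intermediate word list is built and nothing is re-joined.
--     out = []
--     word = []
--     for ch in sentence:
--         if ch.isspace():
--             if word:
--                 _flush(word, out)
--                 word = []
--         else:
--             word.append(ch)
--     if word:
--         _flush(word, out)
--     return ''.join(out)
--
--
-- def _flush(word, out):
--     # "...or" after a non-vowel gains a 'u' before the final 'r'.
--     if (len(word) > 3 and word[-1] == 'r' and word[-2] == 'o'
--             and word[-3] not in 'aeiouy'):
--         word.insert(len(word) - 1, 'u')
--     if out:
--         out.append(' ')
--     out.extend(word)
-- ===== Notes on version B (the rewrite author's own statement) =====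
-- stated objective: alternative
-- what changed: Replaces A's split-into-word-list / per-word loop / space-join pipeline with a single character-level scan that accumulates the current word and flushes it (inserting a u before the final r when the -or rule fires) straight into the output, so no intermediate word list is built and nothing is re-joined.
import Mathlib
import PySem

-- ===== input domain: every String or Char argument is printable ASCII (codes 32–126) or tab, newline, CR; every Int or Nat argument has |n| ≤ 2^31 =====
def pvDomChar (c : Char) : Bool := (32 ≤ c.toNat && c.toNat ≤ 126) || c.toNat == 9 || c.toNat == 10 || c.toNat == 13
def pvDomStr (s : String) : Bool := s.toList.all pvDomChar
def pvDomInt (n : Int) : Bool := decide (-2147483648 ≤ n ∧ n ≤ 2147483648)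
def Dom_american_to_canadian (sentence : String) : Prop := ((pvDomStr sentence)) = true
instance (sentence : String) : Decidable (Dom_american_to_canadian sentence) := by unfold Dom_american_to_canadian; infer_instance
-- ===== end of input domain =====

-- B replaces A's split / per-word loop / rejoin by a single character-level scan that
-- flushes each word into the output as it ends (objective: alternative, same cost).

-- ===== PORT A =====
def pvVowels : List Char := ['a', 'e', 'i', 'o', 'u', 'y']

-- body of A's loop: the conditional suffix rewrite of one word
def pvFixWordA (word : List Char) : List Char :=
  if PySem.List.len word > 3 ∧ PySem.List.pyGetD word (-3) ' ' ∉ pvVowels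
      ∧ PySem.List.slice word (some (-2)) none = ['o', 'r'] then
    PySem.List.slice word none (some (-2)) ++ ['o', 'u', 'r']
  else word

def american_to_canadian (sentence : String) : String :=
  String.ofList (PySem.Chars.join [' ']
    ((PySem.Chars.split₀ sentence.toList).foldl (fun acc w => acc ++ [pvFixWordA w]) []))

-- ===== PORT B =====
-- Source B's _flush: fix the word's ending, then append it (separated by ' ') to the output
def pvFixWordB (word : List Char) : List Char :=
  if PySem.List.len word > 3 ∧ PySem.List.pyGetD word (-1) ' ' = 'r'
      ∧ PySem.List.pyGetD word (-2) ' ' = 'o'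
      ∧ PySem.List.pyGetD word (-3) ' ' ∉ ['a', 'e', 'i', 'o', 'u', 'y'] then
    PySem.List.insert word (PySem.List.len word - 1) 'u'
  else word

def pvFlush (word out : List Char) : List Char :=
  (if out.isEmpty then out else out ++ [' ']) ++ pvFixWordB word

-- Source B's for-loop over the characters, carrying (out, word)
def pvScan : List Char → List Char → List Char → List Char
  | [], out, word => if word.isEmpty then out else pvFlush word out
  | c :: rest, out, word =>
    if PySem.Chars.isspace c then
      if word.isEmpty then pvScan rest out word
      else pvScan rest (pvFlush word out) []
    else pvScan rest out (word ++ [c])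

def american_to_canadian_alt (sentence : String) : String :=
  String.ofList (pvScan sentence.toList [] [])

-- ===== PRECONDITION & SPEC =====
def Spec_american_to_canadian (sentence : String) (out : String) : Prop := out = american_to_canadian_alt sentence
instance (sentence : String) (out : String) : Decidable (Spec_american_to_canadian sentence out) := by unfold Spec_american_to_canadian; infer_instance

-- ===== CLAIM (what is proved, stated in full; the proofs are below) =====
def Claim_equal_american_to_canadian : Prop := ∀ (sentence : String), Dom_american_to_canadian sentence → Spec_american_to_canadian sentence (american_to_canadian sentence)

-- ===== LEMMAS AND PROOFS =====

-- the joined-and-fixed rendering of a word list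
def pvJ (ws : List (List Char)) : List Char :=
  PySem.Chars.join [' '] (ws.map pvFixWordA)

lemma pvFixWordA_ne_nil (w : List Char) (h : w ≠ []) : pvFixWordA w ≠ [] := by
  unfold pvFixWordA
  split
  · simp
  · exact h

lemma pvJoin_snoc (ws : List (List Char)) (w : List Char) :
    PySem.Chars.join [' '] (ws ++ [w]) =
      if ws.isEmpty then w else PySem.Chars.join [' '] ws ++ ' ' :: w := by
  induction ws with
  | nil => simp [PySem.Chars.join_singleton]
  | cons x t ih =>
    cases t with
    | nil =>
      simp [PySem.Chars.join_cons_cons, PySem.Chars.join_singleton]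
    | cons y t' =>
      rw [show (x :: y :: t') ++ [w] = x :: y :: (t' ++ [w]) from rfl,
        PySem.Chars.join_cons_cons [' '] x y (t' ++ [w]),
        show y :: (t' ++ [w]) = (y :: t') ++ [w] from rfl, ih]
      simp [PySem.Chars.join_cons_cons]

lemma pvJoin_ne_nil (ws : List (List Char)) (h : ws ≠ []) (hne : ∀ w ∈ ws, w ≠ []) :
    PySem.Chars.join [' '] ws ≠ [] := by
  match ws with
  | [x] =>
    rw [PySem.Chars.join_singleton]
    exact hne x (by simp)
  | x :: y :: t =>
    rw [PySem.Chars.join_cons_cons]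
    simp

-- the last three characters determine everything: w = ys ++ [a, b, c]
lemma pvLast3 (w : List Char) (h : 3 ≤ w.length) :
    ∃ ys a b c, w = ys ++ [a, b, c] := by
  match hr : w.reverse with
  | [] | [_] | [_, _] =>
    have h2 : w.reverse.length ≤ 2 := by rw [hr]; simp
    simp at h2
    omega
  | c :: b :: a :: t =>
    refine ⟨t.reverse, a, b, c, ?_⟩
    have := congrArg List.reverse hr
    simpa using this

lemma pvGetAppend3 (ys : List Char) (a b c : Char) (k j : Nat) (hk : k < 3)
    (hj : j = (ys ++ [a, b, c]).length - (3 - k)) :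
    (ys ++ [a, b, c])[j]? = ([a, b, c] : List Char)[k]? := by
  rw [List.getElem?_append_right (by simp at hj ⊢; omega)]
  congr 1
  simp at hj ⊢
  omega

-- the two word-fixers agree
lemma pvFix_eq (w : List Char) : pvFixWordA w = pvFixWordB w := by
  by_cases hlen : 3 ≤ w.length
  · obtain ⟨ys, a, b, c, rfl⟩ := pvLast3 w hlen
    have hl : (ys ++ [a, b, c]).length = ys.length + 3 := by simp
    have h1 : PySem.List.pyGetD (ys ++ [a, b, c]) (-1) ' ' = c := by
      rw [PySem.List.pyGetD_neg_ofNat _ 1 ' ' (by omega) (by omega)]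
      apply Option.some.inj
      rw [← List.getElem?_eq_getElem, pvGetAppend3 ys a b c 2 _ (by omega) (by omega)]
      simp
    have h2 : PySem.List.pyGetD (ys ++ [a, b, c]) (-2) ' ' = b := by
      rw [PySem.List.pyGetD_neg_ofNat _ 2 ' ' (by omega) (by omega)]
      apply Option.some.inj
      rw [← List.getElem?_eq_getElem, pvGetAppend3 ys a b c 1 _ (by omega) (by omega)]
      simp
    have h3 : PySem.List.pyGetD (ys ++ [a, b, c]) (-3) ' ' = a := by
      rw [PySem.List.pyGetD_neg_ofNat _ 3 ' ' (by omega) (by omega)]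
      apply Option.some.inj
      rw [← List.getElem?_eq_getElem, pvGetAppend3 ys a b c 0 _ (by omega) (by omega)]
      simp
    have hs2 : PySem.List.slice (ys ++ [a, b, c]) (some (-2)) none = [b, c] := by
      rw [PySem.List.slice_from_neg_ofNat _ 2 (by omega), hl, List.drop_append]
      simp [List.drop_of_length_le]
    have ht2 : PySem.List.slice (ys ++ [a, b, c]) none (some (-2)) = ys ++ [a] := by
      rw [PySem.List.slice_to_neg_ofNat _ 2 (by omega), hl, List.take_append]
      simp [List.take_of_length_le]
    have hins : PySem.List.insert (ys ++ [a, b, c]) (PySem.List.len (ys ++ [a, b, c]) - 1) 'u'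
        = ys ++ [a, b, 'u', c] := by
      rw [PySem.List.len_eq, hl]
      have hcast : ((ys.length + 3 : Nat) : Int) - 1 = ((ys.length + 2 : Nat) : Int) := by
        push_cast; ring
      rw [hcast, PySem.List.insert_natCast _ _ _ (by simp), List.take_append, List.drop_append]
      simp [List.take_of_length_le, List.drop_of_length_le]
    unfold pvFixWordA pvFixWordB
    rw [h1, h2, h3, hs2, ht2, hins, PySem.List.len_eq, hl]
    by_cases hA : (((ys.length + 3 : Nat) : Int) > 3 ∧ a ∉ pvVowels ∧ ([b, c] : List Char) = ['o', 'r'])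
    · obtain ⟨hA1, hA2, hA3⟩ := hA
      obtain ⟨hb, hc⟩ : b = 'o' ∧ c = 'r' := by simpa using hA3
      rw [if_pos ⟨hA1, hA2, hA3⟩,
        if_pos ⟨hA1, by simp [hc], by simp [hb], by simpa [pvVowels] using hA2⟩]
      simp [hb, hc]
    · rw [if_neg hA, if_neg]
      intro ⟨hB1, hB2, hB3, hB4⟩
      exact hA ⟨hB1, by simpa [pvVowels] using hB4, by simp [hB2, hB3]⟩
  · have hna : ¬ (PySem.List.len w > 3 ∧ PySem.List.pyGetD w (-3) ' ' ∉ pvVowels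
        ∧ PySem.List.slice w (some (-2)) none = ['o', 'r']) := by
      rw [PySem.List.len_eq]
      intro ⟨h1, _⟩; omega
    have hnb : ¬ (PySem.List.len w > 3 ∧ PySem.List.pyGetD w (-1) ' ' = 'r'
        ∧ PySem.List.pyGetD w (-2) ' ' = 'o'
        ∧ PySem.List.pyGetD w (-3) ' ' ∉ (['a', 'e', 'i', 'o', 'u', 'y'] : List Char)) := by
      rw [PySem.List.len_eq]
      intro ⟨h1, _⟩; omega
    rw [pvFixWordA, pvFixWordB, if_neg hna, if_neg hnb]

lemma pvFlush_eq_snoc (acc : List (List Char)) (w : List Char)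
    (hacc : ∀ v ∈ acc, v ≠ []) :
    pvFlush w (pvJ acc) = pvJ (acc ++ [w]) := by
  unfold pvFlush pvJ
  rw [List.map_append, List.map_singleton, pvJoin_snoc]
  by_cases h : acc = []
  · subst h; simp [pvFix_eq]
  · have h1 : (acc.map pvFixWordA).isEmpty = false := by
      simp [List.isEmpty_eq_false_iff, h]
    have h2 : PySem.Chars.join [' '] (acc.map pvFixWordA) ≠ [] := by
      apply pvJoin_ne_nil _ (by simp [h])
      intro v hv
      obtain ⟨u, hu, rfl⟩ := List.mem_map.mp hv
      exact pvFixWordA_ne_nil u (hacc u hu)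
    rw [h1, if_neg (by simpa using h2)]
    simp [pvFix_eq]

-- main invariant: the scan equals split-fix-join, for any split₀.go state
lemma pvScan_go (cs : List Char) : ∀ (cur : List Char) (acc : List (List Char)),
    (∀ v ∈ acc, v ≠ []) →
    pvScan cs (pvJ acc.reverse) cur.reverse = pvJ (PySem.Chars.split₀.go cs cur acc) := by
  induction cs with
  | nil =>
    intro cur acc hacc
    rw [pvScan, PySem.Chars.split₀.go]
    by_cases hc : cur = []
    · subst hc; simp
    · have h1 : cur.reverse.isEmpty = false := by simp [hc]
      have h2 : cur.isEmpty = false := by simp [hc]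
      rw [h1, h2]
      simp only [Bool.false_eq_true, if_false]
      rw [pvFlush_eq_snoc acc.reverse cur.reverse (by simpa using hacc)]
      simp
  | cons c rest ih =>
    intro cur acc hacc
    rw [pvScan, PySem.Chars.split₀.go]
    by_cases hsp : PySem.Chars.isspace c = true
    · rw [if_pos hsp, if_pos hsp]
      by_cases hc : cur = []
      · subst hc
        simp only [List.reverse_nil, List.isEmpty_nil, if_true]
        exact ih [] acc hacc
      · have h1 : cur.reverse.isEmpty = false := by simp [hc]
        have h2 : cur.isEmpty = false := by simp [hc]
        rw [h1, h2]
        simp only [Bool.false_eq_true, if_false]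
        rw [pvFlush_eq_snoc acc.reverse cur.reverse (by simpa using hacc)]
        have := ih [] (cur.reverse :: acc) (by
          intro v hv
          rcases List.mem_cons.mp hv with hx | hx
          · subst hx; simp [hc]
          · exact hacc v hx)
        simpa using this
    · rw [if_neg hsp, if_neg hsp]
      have := ih (c :: cur) acc hacc
      simpa using this

lemma pvScan_eq_split (cs : List Char) :
    pvScan cs [] [] = pvJ (PySem.Chars.split₀ cs) := by
  have := pvScan_go cs [] [] (by simp)
  simpa [pvJ, PySem.Chars.split₀, PySem.Chars.join_nil] using this

-- ===== VERDICT (by name: the statement is the Claim_ definition above) =====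
theorem american_to_canadian_spec : Claim_equal_american_to_canadian := by
  intro sentence _
  unfold Spec_american_to_canadian american_to_canadian american_to_canadian_alt
  rw [PySem.List.foldl_append_singleton_eq_map, List.nil_append, pvScan_eq_split]
  rfl
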